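-- pv_equiv track=rewrite | github.com/hyelimchoi1223/Algorithm-Study | 백준/[백준]1744/solved.py | add_two_elements
-- ===== SOURCE A (Python) =====
-- def add_two_elements(iterator):
--     result = 0
--     for i in range(0, len(iterator), 2):
--         if i+1 == len(iterator):
--             result += iterator[i]
--         else:
--             result += (iterator[i]*iterator[i+1])
--     return result
-- ===== SOURCE B (Python) =====
-- def add_two_elements(iterator):
--     result = sum(a * b for a, b in zip(iterator[::2], iterator[1::2]))
--     if len(iterator) % 2 == 1:
--         result += iterator[-1]
--     return result
-- ===== Notes on version B (the rewrite author's own statement) =====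
-- stated objective: idiomatic
-- what changed: Replaces the per-index loop with its range(0,len,2) stepping and in-loop boundary branch by two strided slices paired with zip and summed, plus a single out-of-loop adjustment adding the last element when the length is odd.
import Mathlib
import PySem

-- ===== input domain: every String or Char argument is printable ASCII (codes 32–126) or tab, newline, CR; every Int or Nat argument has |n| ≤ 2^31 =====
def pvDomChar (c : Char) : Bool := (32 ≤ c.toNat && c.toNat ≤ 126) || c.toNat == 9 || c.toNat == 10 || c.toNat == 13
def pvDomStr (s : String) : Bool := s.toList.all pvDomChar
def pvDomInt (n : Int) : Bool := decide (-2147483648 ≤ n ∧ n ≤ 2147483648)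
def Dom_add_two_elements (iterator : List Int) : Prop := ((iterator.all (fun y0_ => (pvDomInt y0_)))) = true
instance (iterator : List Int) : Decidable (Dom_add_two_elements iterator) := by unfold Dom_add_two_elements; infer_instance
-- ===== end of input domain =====

-- B replaces A's index-stepping loop with an in-loop boundary branch by two strided slices paired
-- with zip and summed, plus one out-of-loop adjustment for the odd-length tail (same cost, more idiomatic).

-- ===== PORT A =====
-- for i in range(0, len(iterator), 2): indices i and i+1 are always in range where read,
-- so Python's iterator[i] never raises; ported with pyGetD (default never used).
def add_two_elements (iterator : List Int) : Int :=
  (PySem.List.pyRange 0 iterator.length 2).foldl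
    (fun result i =>
      if i + 1 = (iterator.length : Int) then result + PySem.List.pyGetD iterator i 0
      else result + PySem.List.pyGetD iterator i 0 * PySem.List.pyGetD iterator (i + 1) 0)
    0

-- ===== PORT B =====
-- iterator[::2] / iterator[1::2] via slice? (step 2, never none since step ≠ 0: .getD []);
-- iterator[-1] is read only when the length is odd, hence on a nonempty list: pyGetD's default is never used.
def add_two_elements_alt (iterator : List Int) : Int :=
  let evens := (PySem.List.slice? iterator none none 2).getD []
  let odds := (PySem.List.slice? iterator (some 1) none 2).getD []
  let result := ((evens.zip odds).map (fun p => p.1 * p.2)).sum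
  if PySem.Int.mod (iterator.length : Int) 2 = 1 then result + PySem.List.pyGetD iterator (-1) 0
  else result

-- ===== PRECONDITION & SPEC =====
def Spec_add_two_elements (iterator : List Int) (out : Int) : Prop := out = add_two_elements_alt iterator
instance (iterator : List Int) (out : Int) : Decidable (Spec_add_two_elements iterator out) := by unfold Spec_add_two_elements; infer_instance

-- ===== CLAIM (what is proved, stated in full; the proofs are below) =====
def Claim_equal_add_two_elements : Prop := ∀ (iterator : List Int), Dom_add_two_elements iterator → Spec_add_two_elements iterator (add_two_elements iterator)

-- ===== LEMMAS AND PROOFS =====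

-- the common reference value: sum of products of adjacent pairs, lone tail added as itself
def pairSum : List Int → Int
  | [] => 0
  | [a] => a
  | a :: b :: t => a * b + pairSum t

-- the elements of xs at even indices, structurally
def evensOf : List Int → List Int
  | [] => []
  | [a] => [a]
  | a :: _ :: t => a :: evensOf t

lemma filterMap_evens (xs : List Int) :
    List.filterMap (fun k : Nat => xs[2*k]?) (List.range ((xs.length+1)/2)) = evensOf xs := by
  induction xs using evensOf.induct with
  | case1 => rfl
  | case2 a => simp [evensOf, List.range_succ]
  | case3 a b t ih =>
    have hlen : ((a :: b :: t).length + 1)/2 = (t.length+1)/2 + 1 := by simp; omega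
    rw [hlen, List.range_succ_eq_map, List.filterMap_cons, List.filterMap_map]
    simp only [Nat.mul_zero, List.getElem?_cons_zero, Function.comp_def]
    have he : (fun k : Nat => (a :: b :: t)[2*(k+1)]?) = (fun k : Nat => t[2*k]?) := by
      funext k
      have h2 : 2*(k+1) = 2*k + 1 + 1 := by omega
      simp [h2]
    rw [he, ih, evensOf]

lemma count_eq (n : Nat) : (if 0 < n then (((n : Int) + 2 - 1) / 2).toNat else 0) = (n + 1) / 2 := by
  split <;> omega

lemma slice_evens (xs : List Int) :
    PySem.List.slice? xs none none 2 = some (evensOf xs) := by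
  rw [← filterMap_evens]
  simp only [PySem.List.slice?, PySem.List.sliceIndices]
  simp
  rw [count_eq]
  apply List.filterMap_congr
  intro k _
  congr 1

lemma slice_odds (xs : List Int) :
    PySem.List.slice? xs (some 1) none 2 = some (evensOf xs.tail) := by
  cases xs with
  | nil => rfl
  | cons a t =>
    rw [← filterMap_evens]
    simp only [PySem.List.slice?, PySem.List.sliceIndices]
    simp
    rw [count_eq]
    apply List.filterMap_congr
    intro k _
    have h : (1 + 2*(k:Int)).toNat = 2*k + 1 := by omega
    simp [h]

lemma evensOf_cons (b : Int) (t : List Int) : evensOf (b :: t) = b :: evensOf t.tail := by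
  cases t <;> rfl

lemma loopA (xs : List Int) : ∀ acc : Int,
    (List.range ((xs.length+1)/2)).foldl
      (fun r (k : Nat) => if 2*(k:Int) + 1 = (xs.length:Int) then r + PySem.List.pyGetD xs (2*(k:Int)) 0
                  else r + PySem.List.pyGetD xs (2*(k:Int)) 0 * PySem.List.pyGetD xs (2*(k:Int)+1) 0) acc
      = acc + pairSum xs := by
  induction xs using pairSum.induct with
  | case1 => simp [pairSum]
  | case2 a =>
    intro acc
    simp [pairSum, List.range_succ, PySem.List.pyGetD]
  | case3 a b t ih =>
    intro acc
    have hlen : ((a :: b :: t).length + 1)/2 = (t.length+1)/2 + 1 := by simp; omega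
    rw [hlen, List.range_succ_eq_map, List.foldl_cons, List.foldl_map]
    have hfirst : (if 2*((0:Nat):Int) + 1 = ((a::b::t).length:Int) then acc + PySem.List.pyGetD (a::b::t) (2*((0:Nat):Int)) 0
        else acc + PySem.List.pyGetD (a::b::t) (2*((0:Nat):Int)) 0 * PySem.List.pyGetD (a::b::t) (2*((0:Nat):Int)+1) 0)
        = acc + a * b := by
      rw [if_neg (by simp; omega)]
      norm_num [PySem.List.pyGetD_ofNat']
    rw [hfirst]
    have hf : (fun (r : Int) (k : Nat) =>
        (if 2*((Nat.succ k : Nat):Int) + 1 = ((a::b::t).length:Int) then r + PySem.List.pyGetD (a::b::t) (2*((Nat.succ k : Nat):Int)) 0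
         else r + PySem.List.pyGetD (a::b::t) (2*((Nat.succ k : Nat):Int)) 0 * PySem.List.pyGetD (a::b::t) (2*((Nat.succ k : Nat):Int)+1) 0))
        = (fun (r : Int) (k : Nat) => if 2*(k:Int) + 1 = (t.length:Int) then r + PySem.List.pyGetD t (2*(k:Int)) 0
            else r + PySem.List.pyGetD t (2*(k:Int)) 0 * PySem.List.pyGetD t (2*(k:Int)+1) 0) := by
      funext r k
      have e0 : (2*((Nat.succ k : Nat):Int)) = ((2*k+2 : Nat) : Int) := by push_cast; ring
      have e1 : (2*((Nat.succ k : Nat):Int)+1) = ((2*k+3 : Nat) : Int) := by push_cast; ring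
      have e2 : (2*(k:Int)) = ((2*k : Nat) : Int) := by push_cast; ring
      have e3 : (2*(k:Int)+1) = ((2*k+1 : Nat) : Int) := by push_cast; ring
      have hc : (((2*k+3 : Nat):Int) = ((a::b::t).length:Int)) ↔ (((2*k+1 : Nat):Int) = (t.length:Int)) := by
        simp; omega
      rw [e1, e0, e3, e2, PySem.List.pyGetD_natCast, PySem.List.pyGetD_natCast,
          PySem.List.pyGetD_natCast, PySem.List.pyGetD_natCast]
      have g1 : (a::b::t).getD (2*k+2) 0 = t.getD (2*k) 0 := by simp [List.getD]
      have g2 : (a::b::t).getD (2*k+3) 0 = t.getD (2*k+1) 0 := by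
        have : 2*k+3 = (2*k+1) + 1 + 1 := by omega
        rw [this]; simp [List.getD]
      rw [g1, g2]
      by_cases h : ((2*k+1 : Nat):Int) = (t.length:Int)
      · rw [if_pos (hc.mpr h), if_pos h]
      · rw [if_neg (fun hh => h (hc.mp hh)), if_neg h]
    rw [hf, ih (acc + a * b), pairSum]
    ring

lemma a_eq_pairSum (xs : List Int) : add_two_elements xs = pairSum xs := by
  unfold add_two_elements
  rw [PySem.List.pyRange_of_pos 0 (xs.length : Int) (by norm_num), List.foldl_map]
  have hc : (if (0:Int) < (xs.length:Int) then (((xs.length:Int) - 0 + 2 - 1)/2).toNat else 0)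
      = (xs.length + 1)/2 := by split <;> omega
  rw [hc]
  have h := loopA xs 0
  rw [zero_add] at h
  simp only [zero_add]
  exact h

lemma b_eq_pairSum (xs : List Int) : add_two_elements_alt xs = pairSum xs := by
  induction xs using pairSum.induct with
  | case1 => rfl
  | case2 a =>
    simp [add_two_elements_alt, slice_evens, slice_odds, evensOf, PySem.Int.mod,
      PySem.List.pyGetD, PySem.List.pyGet?, PySem.List.pyIdx?, pairSum]
  | case3 a b t ih =>
    unfold add_two_elements_alt at ih ⊢
    rw [slice_evens, slice_odds] at ih ⊢
    simp only [Option.getD_some, List.tail_cons] at ih ⊢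
    rw [show evensOf (a :: b :: t) = a :: evensOf t from rfl, evensOf_cons]
    simp only [List.zip_cons_cons, List.map_cons, List.sum_cons]
    have hmod : PySem.Int.mod (((a :: b :: t).length : Nat) : Int) 2 = PySem.Int.mod ((t.length : Nat) : Int) 2 := by
      rw [PySem.Int.mod_eq_emod_of_pos (show (0:Int) < 2 by norm_num),
          PySem.Int.mod_eq_emod_of_pos (show (0:Int) < 2 by norm_num)]
      simp; omega
    rw [hmod]
    by_cases h : PySem.Int.mod ((t.length : Nat) : Int) 2 = 1
    · rw [if_pos h] at ih ⊢
      have ht : t ≠ [] := by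
        intro he; subst he; simp [PySem.Int.mod] at h
      have hne : (b :: t) ≠ [] := by simp
      have hne2 : (a :: b :: t) ≠ [] := by simp
      rw [PySem.List.pyGetD_neg_one _ _ hne2]
      rw [PySem.List.pyGetD_neg_one _ _ ht] at ih
      rw [List.getLast_cons hne, List.getLast_cons ht]
      rw [pairSum, ← ih]
      ring
    · rw [if_neg h] at ih ⊢
      rw [pairSum, ← ih]

-- ===== VERDICT (by name: the statement is the Claim_ definition above) =====
theorem add_two_elements_spec : Claim_equal_add_two_elements := by
  intro iterator _
  unfold Spec_add_two_elements
  rw [a_eq_pairSum, b_eq_pairSum]
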